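-- pv_equiv track=rewrite | github.com/LucienTriail/Search3 | methode2.py | construire_index
-- ===== SOURCE A (Python) =====
-- def construire_index(texte):
--     """
--     Cette fonction construit un index qui répertorie les positions de chaque mot dans une chaîne de caractères.
--
--     Args:
--         texte (str): La chaîne de caractères à indexer.
--
--     Returns:
--         dict: Un dictionnaire qui associe à chaque mot la liste de ses positions dans la chaîne de caractères.
--     """
--     mots = texte.split()
--     index = {}
--     for i, mot in enumerate(mots):
--         if mot not in index:
--             index[mot] = []
--         index[mot].append(i)
--     return index
-- ===== SOURCE B (Python) =====
-- def construire_index(texte):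
--     mots = texte.split()
--     return {mot: [i for i, m in enumerate(mots) if m == mot]
--             for mot in dict.fromkeys(mots)}
-- ===== Notes on version B (the rewrite author's own statement) =====
-- stated objective: alternative
-- what changed: A builds the index in one incremental scan, appending to a per-word list with a membership check; B first collects the distinct words in first-occurrence order (dict.fromkeys) and then computes each word's position list with a separate enumerate-filter comprehension, as a dict comprehension.
import Mathlib
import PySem

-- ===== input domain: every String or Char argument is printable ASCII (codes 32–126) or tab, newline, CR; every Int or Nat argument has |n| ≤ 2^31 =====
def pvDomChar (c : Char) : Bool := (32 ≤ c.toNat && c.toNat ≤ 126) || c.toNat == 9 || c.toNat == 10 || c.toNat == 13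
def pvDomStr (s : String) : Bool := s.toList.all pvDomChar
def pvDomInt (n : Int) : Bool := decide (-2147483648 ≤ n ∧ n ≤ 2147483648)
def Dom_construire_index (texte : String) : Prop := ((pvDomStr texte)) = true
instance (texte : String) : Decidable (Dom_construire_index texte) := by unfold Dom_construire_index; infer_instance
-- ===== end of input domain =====

-- B replaces A's single incremental scan-and-append by distinct-words-then-per-word-scan (alternative decomposition, not faster).

-- ===== PORT A =====
-- one pass over enumerate(mots): ensure the key exists, then append i to index[mot]
def construire_index (texte : String) : List (String × List Int) :=
  let mots := PySem.Str.split₀ texte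
  let index := (PySem.List.enumerate mots 0).foldl
    (fun (d : PySem.Dict String (List Int)) (p : Int × String) =>
      let d := if d.contains p.2 then d else d.insert p.2 []
      d.modify p.2 [] (fun l => l ++ [p.1]))
    PySem.Dict.empty
  index.items

-- ===== PORT B =====
-- distinct words in first-occurrence order (dict.fromkeys), then one enumerate-filter comprehension per word
def construire_index_alt (texte : String) : List (String × List Int) :=
  let mots := PySem.Str.split₀ texte
  (PySem.List.dedup mots).map
    (fun mot => (mot, ((PySem.List.enumerate mots 0).filter (fun p => p.2 == mot)).map (·.1)))

-- ===== PRECONDITION & SPEC =====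
def Spec_construire_index (texte : String) (out : List (String × List Int)) : Prop := out = construire_index_alt texte
instance (texte : String) (out : List (String × List Int)) : Decidable (Spec_construire_index texte out) := by unfold Spec_construire_index; infer_instance

-- ===== CLAIM (what is proved, stated in full; the proofs are below) =====
def Claim_equal_construire_index : Prop := ∀ (texte : String), Dom_construire_index texte → Spec_construire_index texte (construire_index texte)

-- ===== LEMMAS AND PROOFS =====

-- A's compound step (setdefault-with-[] then append) is just modify with default []
theorem step_eq_modify (d : PySem.Dict String (List Int)) (p : Int × String) :
    (let d' := if d.contains p.2 then d else d.insert p.2 []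
     d'.modify p.2 [] (fun l => l ++ [p.1])) = d.modify p.2 [] (fun l => l ++ [p.1]) := by
  by_cases h : d.contains p.2
  · simp [h]
  · simp only [h]
    simp [PySem.Dict.modify, PySem.Dict.getD_insert_self, PySem.Dict.insert_insert_self,
      PySem.Dict.getD_of_not_contains d [] (by simpa using h)]

-- the getD value of A's fold: default-prefix ++ the first components of the matching pairs
theorem getD_fold_swap (l : List (Int × String)) (d : PySem.Dict String (List Int)) (c : String) :
    (l.foldl (fun d p => d.modify p.2 [] (fun l => l ++ [p.1])) d).getD c []
      = d.getD c [] ++ (l.filter (fun p => p.2 == c)).map (·.1) := by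
  induction l generalizing d with
  | nil => simp
  | cons p t ih =>
    simp only [List.foldl_cons, ih, List.filter_cons]
    by_cases h : p.2 = c
    · simp [h, PySem.Dict.getD_modify_self]
    · rw [PySem.Dict.getD_modify_of_ne]
      · simp [h]
      · exact fun hc => h hc.symm

-- ===== VERDICT (by name: the statement is the Claim_ definition above) =====
theorem construire_index_spec : Claim_equal_construire_index := by
  intro texte _
  unfold Spec_construire_index construire_index construire_index_alt
  simp only []
  set mots := PySem.Str.split₀ texte with hm
  set l := PySem.List.enumerate mots 0 with hl
  have hstep : (l.foldl
      (fun (d : PySem.Dict String (List Int)) (p : Int × String) =>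
        let d := if d.contains p.2 then d else d.insert p.2 []
        d.modify p.2 [] (fun l => l ++ [p.1])) PySem.Dict.empty)
      = l.foldl (fun d p => d.modify p.2 [] (fun l => l ++ [p.1])) PySem.Dict.empty := by
    apply List.foldl_ext
    intro d p _
    exact step_eq_modify d p
  rw [hstep]
  set D := l.foldl (fun d p => d.modify p.2 [] (fun l => l ++ [p.1])) PySem.Dict.empty with hD
  have hnd : D.keys.Nodup := by
    rw [hD]
    exact PySem.Dict.nodup_keys_foldl_modify_key l (·.2) [] (fun d p l => l ++ [p.1])
      PySem.Dict.empty (by simp)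
  have hkeys : D.keys = PySem.List.dedup mots := by
    rw [hD, PySem.Dict.keys_foldl_modify_key]
    simp [hl, PySem.Set.update_eq_append_filter, PySem.List.map_snd_enumerate]
  rw [PySem.Dict.items_eq_map_keys D hnd [], hkeys]
  apply List.map_congr_left
  intro w _
  have := getD_fold_swap l PySem.Dict.empty w
  simp only [PySem.Dict.getD_empty, List.nil_append] at this
  rw [← hD] at this
  simp [this]
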